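-- pv_equiv track=rewrite | github.com/thomason-jesse/nlu_pipeline | src/speech/script/recording/results/prepare_data_files.py | process_phrase
-- ===== SOURCE A (Python) =====
-- def process_phrase(phrase, pass_num):
--     words = phrase.strip().split()
--
--     #Used to concatenate numbers.
--     whole_num = None
--
--     #Processed phrase to return.
--     return_phrase = ""
--
--     for word in words:
--         if (not word in numbers) or pass_num == 1 or pass_num == 3:
--             #If previous words made up number, then write it to file.
--             if not whole_num == None:
--                 return_phrase += whole_num + " "
--                 whole_num = None
--
--             if word in abbreviations:
--                 return_phrase += abbreviations[word] + " "
--             else: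
--                 return_phrase += word + " "
--         else:
--             #Either begins or continues constructing full number from words.
--             if whole_num == None:
--                 whole_num = numbers[word]
--             else:
--                 whole_num += numbers[word]
--
--
--     if not whole_num == None:
--         return_phrase += whole_num
--
--     #Prepares phrases for parser training file.
--     if pass_num == 2:
--         word_list = return_phrase.split()
--         return_phrase = ""
--
--         for word in word_list:
--             word = word.strip(',')
--             split_list = word.split('\'')
--
--             #Token had apostrophe.
--             if len(split_list) == 2:
--                 return_phrase += split_list[0] + ' '
--                 return_phrase += '\'' + split_list[1] + ' '
--             else:
--                 return_phrase += word + ' '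
--     #For speech.
--     elif pass_num == 3:
--         return_phrase = '<s> ' + return_phrase.strip() + ' </s>'
--
--     return return_phrase.strip() + "\n"
--
-- numbers = {"zero": "0", "one": "1", "two": "2", "three": "3",
--            "four": "4", "five": "5", "six": "6",
--            "seven": "7", "eight": "8", "nine": "9",
--            "thirty-four": "34", "b": "b",
--            "fourteen": "14", "eighteen": "18",
--            "twenty": "20", "thirty-two": "32",
--            "thirty-five": "35", "ten": "10",
--            "twelve": "12", "sixteen": "16"}
--
-- abbreviations = {"P.I.": "pi", "T.A.": "ta", "B": "b"}
-- ===== SOURCE B (Python) =====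
-- # Rewrite-system re-implementation: tag each word as a number cell or a text
-- # token, then repeatedly contract the leftmost adjacent pair of number cells
-- # until a fixpoint, then format the resulting token list per pass.
-- numbers = {"zero": "0", "one": "1", "two": "2", "three": "3",
--            "four": "4", "five": "5", "six": "6",
--            "seven": "7", "eight": "8", "nine": "9",
--            "thirty-four": "34", "b": "b",
--            "fourteen": "14", "eighteen": "18",
--            "twenty": "20", "thirty-two": "32",
--            "thirty-five": "35", "ten": "10",
--            "twelve": "12", "sixteen": "16"}
--
-- abbreviations = {"P.I.": "pi", "T.A.": "ta", "B": "b"}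
--
--
-- def process_phrase(phrase, pass_num):
--     merging = pass_num not in (1, 3)
--     # tagged cells: (is-number-cell, rendered text)
--     cells = [(merging and w in numbers,
--               numbers[w] if merging and w in numbers else abbreviations.get(w, w))
--              for w in phrase.strip().split()]
--
--     # normalise by a rewrite rule: contract the leftmost adjacent pair of
--     # number cells into one; repeat until no adjacent pair remains.
--     while True:
--         for i in range(len(cells) - 1):
--             if cells[i][0] and cells[i + 1][0]:
--                 cells[i:i + 2] = [(True, cells[i][1] + cells[i + 1][1])]
--                 break
--         else:
--             break
--
--     tokens = [t for _, t in cells]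
--
--     # per-pass formatting of the token list
--     if pass_num == 2:
--         out = []
--         for tok in tokens:
--             stripped = tok.strip(',')
--             parts = stripped.split("'")
--             if len(parts) == 2:
--                 out.extend((parts[0], "'" + parts[1]))
--             else:
--                 out.append(stripped)
--         result = ' '.join(out)
--     elif pass_num == 3:
--         result = '<s> ' + ' '.join(tokens) + ' </s>'
--     else:
--         result = ' '.join(tokens)
--
--     return result.strip() + "\n"
-- ===== Notes on version B (the rewrite author's own statement) =====
-- stated objective: alternative
-- what changed: B replaces A's single interleaved loop with a pending-number accumulator by a rewrite system: words are first tagged as number cells or expanded text tokens, then the leftmost adjacent pair of number cells is repeatedly contracted until a fixpoint, and a final per-pass stage formats and ' '-joins the token list.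
import Mathlib
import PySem

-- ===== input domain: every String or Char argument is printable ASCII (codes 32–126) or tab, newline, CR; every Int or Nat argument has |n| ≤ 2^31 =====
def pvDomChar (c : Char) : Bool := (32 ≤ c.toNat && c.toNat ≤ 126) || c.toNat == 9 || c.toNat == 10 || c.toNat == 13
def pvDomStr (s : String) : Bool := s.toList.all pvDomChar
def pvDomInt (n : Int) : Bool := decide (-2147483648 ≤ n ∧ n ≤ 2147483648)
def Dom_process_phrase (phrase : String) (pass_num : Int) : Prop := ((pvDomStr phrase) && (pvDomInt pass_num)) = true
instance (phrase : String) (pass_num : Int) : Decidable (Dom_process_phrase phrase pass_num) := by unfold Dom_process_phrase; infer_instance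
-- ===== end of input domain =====

-- B re-implements A as a rewrite system (tag words as number cells / text tokens,
-- contract leftmost adjacent number-cell pairs to a fixpoint, then per-pass
-- formatting of the token list) instead of A's interleaved accumulator loop;
-- objective: alternative decomposition.

-- ===== shared module constants (the Python module dicts `numbers` and `abbreviations`) =====
def pvNumbers : PySem.Dict (List Char) (List Char) := ⟨[
  ("zero".toList, "0".toList), ("one".toList, "1".toList), ("two".toList, "2".toList),
  ("three".toList, "3".toList), ("four".toList, "4".toList), ("five".toList, "5".toList),
  ("six".toList, "6".toList), ("seven".toList, "7".toList), ("eight".toList, "8".toList),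
  ("nine".toList, "9".toList), ("thirty-four".toList, "34".toList), ("b".toList, "b".toList),
  ("fourteen".toList, "14".toList), ("eighteen".toList, "18".toList), ("twenty".toList, "20".toList),
  ("thirty-two".toList, "32".toList), ("thirty-five".toList, "35".toList), ("ten".toList, "10".toList),
  ("twelve".toList, "12".toList), ("sixteen".toList, "16".toList)]⟩

def pvAbbrev : PySem.Dict (List Char) (List Char) := ⟨[
  ("P.I.".toList, "pi".toList), ("T.A.".toList, "ta".toList), ("B".toList, "b".toList)]⟩

-- ===== PORT A =====
-- one step of A's `for word in words` loop; state = (whole_num, return_phrase)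
def pvStepA (pass_num : Int) (st : Option (List Char) × List Char) (word : List Char) :
    Option (List Char) × List Char :=
  if !(pvNumbers.contains word) || pass_num == 1 || pass_num == 3 then
    let rp := match st.1 with
      | some n => st.2 ++ n ++ [' ']
      | none => st.2
    let rp := match pvAbbrev.get? word with
      | some a => rp ++ a ++ [' ']
      | none => rp ++ word ++ [' ']
    (none, rp)
  else
    match st.1 with
    | none => (some (pvNumbers.getD word []), st.2)      -- numbers[word]; key present by the branch guard
    | some n => (some (n ++ pvNumbers.getD word []), st.2)

-- the trailing `if not whole_num == None: return_phrase += whole_num`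
def pvFlushA (st : Option (List Char) × List Char) : List Char :=
  match st.1 with
  | some n => st.2 ++ n
  | none => st.2

-- one step of A's pass-2 loop over `word_list`
def pvPass2A (acc word : List Char) : List Char :=
  let word := PySem.Chars.stripChars word [','];
  let split_list := PySem.Chars.splitOn word ['\''];
  if split_list.length == 2 then
    acc ++ split_list.getD 0 [] ++ [' '] ++ ('\'' :: split_list.getD 1 []) ++ [' ']
  else
    acc ++ word ++ [' ']

def process_phrase (phrase : String) (pass_num : Int) : String :=
  let words := PySem.Chars.split₀ (PySem.Chars.strip phrase.toList)
  let return_phrase := pvFlushA (words.foldl (pvStepA pass_num) (none, []))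
  let return_phrase :=
    if pass_num == 2 then
      (PySem.Chars.split₀ return_phrase).foldl pvPass2A []
    else if pass_num == 3 then
      "<s> ".toList ++ PySem.Chars.strip return_phrase ++ " </s>".toList
    else return_phrase
  String.ofList (PySem.Chars.strip return_phrase ++ ['\n'])

-- ===== PORT B =====
def pvNum (w : List Char) : List Char := pvNumbers.getD w []      -- numbers[w] (key present where used)
def pvTok (w : List Char) : List Char := pvAbbrev.getD w w        -- abbreviations.get(w, w)

def pvMergeable (pass_num : Int) (w : List Char) : Bool :=
  !(pass_num == 1) && !(pass_num == 3) && pvNumbers.contains w    -- merging and w in numbers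

-- tagged cells: (is-number-cell, rendered text)
def pvCells (pass_num : Int) (ws : List (List Char)) : List (Bool × List Char) :=
  ws.map (fun w => if pvMergeable pass_num w then (true, pvNum w) else (false, pvTok w))

-- one rewrite step: contract the LEFTMOST adjacent pair of number cells (Source B's inner for)
def pvMerge1 : List (Bool × List Char) → Option (List (Bool × List Char))
  | (true, a) :: (true, b) :: rest => some ((true, a ++ b) :: rest)
  | x :: rest => (pvMerge1 rest).map (x :: ·)
  | [] => none

theorem pvMerge1_length : ∀ {l l' : List (Bool × List Char)},
    pvMerge1 l = some l' → l'.length < l.length := by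
  intro l
  induction l with
  | nil => intro l' h; simp [pvMerge1] at h
  | cons x rest ih =>
    intro l' h
    match x, rest with
    | (true, a), (true, b) :: r =>
      simp only [pvMerge1, Option.some.injEq] at h
      subst h; simp
    | (true, a), [] =>
      simp [pvMerge1] at h
    | (true, a), (false, t) :: r =>
      simp only [pvMerge1, Option.map_eq_some_iff] at h
      obtain ⟨r', ⟨a', ha', rfl⟩, rfl⟩ := h
      have := ih (l' := (false, t) :: a') (by simp [pvMerge1, ha'])
      simpa using this
    | (false, t), rest =>
      simp only [pvMerge1, Option.map_eq_some_iff] at h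
      obtain ⟨r', hr', rfl⟩ := h
      simpa using ih hr'

-- Source B's `while True` loop: rewrite until no adjacent number-cell pair remains
def pvMergeAll (l : List (Bool × List Char)) : List (Bool × List Char) :=
  match h : pvMerge1 l with
  | none => l
  | some l' => pvMergeAll l'
termination_by l.length
decreasing_by exact pvMerge1_length h

-- pass-2 treatment of one token: comma-strip, then split at a single apostrophe
def pvPass2B (tok : List Char) : List (List Char) :=
  let stripped := PySem.Chars.stripChars tok [','];
  let parts := PySem.Chars.splitOn stripped ['\''];
  if parts.length == 2 then [parts.getD 0 [], '\'' :: parts.getD 1 []]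
  else [stripped]

def process_phrase_alt (phrase : String) (pass_num : Int) : String :=
  let cells := pvCells pass_num (PySem.Chars.split₀ (PySem.Chars.strip phrase.toList))
  let tokens := (pvMergeAll cells).map Prod.snd
  let result :=
    if pass_num == 2 then
      PySem.Chars.join [' '] (tokens.flatMap pvPass2B)
    else if pass_num == 3 then
      "<s> ".toList ++ PySem.Chars.join [' '] tokens ++ " </s>".toList
    else PySem.Chars.join [' '] tokens
  String.ofList (PySem.Chars.strip result ++ ['\n'])

-- ===== PRECONDITION & SPEC =====
def Spec_process_phrase (phrase : String) (pass_num : Int) (out : String) : Prop := out = process_phrase_alt phrase pass_num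
instance (phrase : String) (pass_num : Int) (out : String) : Decidable (Spec_process_phrase phrase pass_num out) := by unfold Spec_process_phrase; infer_instance

-- ===== CLAIM (what is proved, stated in full; the proofs are below) =====
def Claim_equal_process_phrase : Prop := ∀ (phrase : String) (pass_num : Int), Dom_process_phrase phrase pass_num → Spec_process_phrase phrase pass_num (process_phrase phrase pass_num)

-- ===== LEMMAS AND PROOFS =====

-- A's interleaved loop, flushed, written as a structural recursion over the word list
def pvT (pass_num : Int) : Option (List Char) → List (List Char) → List Char
  | none, [] => []
  | some n, [] => n
  | none, w :: ws =>
    if pvMergeable pass_num w then pvT pass_num (some (pvNum w)) ws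
    else pvTok w ++ [' '] ++ pvT pass_num none ws
  | some n, w :: ws =>
    if pvMergeable pass_num w then pvT pass_num (some (n ++ pvNum w)) ws
    else n ++ [' '] ++ pvTok w ++ [' '] ++ pvT pass_num none ws

-- B's token list, written as the same structural recursion
def pvTokS (pass_num : Int) : Option (List Char) → List (List Char) → List (List Char)
  | none, [] => []
  | some n, [] => [n]
  | none, w :: ws =>
    if pvMergeable pass_num w then pvTokS pass_num (some (pvNum w)) ws
    else pvTok w :: pvTokS pass_num none ws
  | some n, w :: ws =>
    if pvMergeable pass_num w then pvTokS pass_num (some (n ++ pvNum w)) ws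
    else n :: pvTok w :: pvTokS pass_num none ws

-- normal form of the rewrite system, computed in one structural pass (proof device)
def pvPush (a : List Char) (l : List (Bool × List Char)) : List (Bool × List Char) :=
  match l with
  | (true, b) :: r => (true, a ++ b) :: r
  | _ => (true, a) :: l

def pvNF : List (Bool × List Char) → List (Bool × List Char)
  | [] => []
  | (false, t) :: r => (false, t) :: pvNF r
  | (true, a) :: r => pvPush a (pvNF r)

-- every token followed by one space (the shape of A's accumulator)
def pvS (ts : List (List Char)) : List Char := (ts.map (· ++ [' '])).flatten

def pvGood (t : List Char) : Bool := !t.isEmpty && t.all (fun c => !PySem.Chars.isspace c)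

theorem pvCond_eq (pass_num : Int) (w : List Char) :
    (!(pvNumbers.contains w) || pass_num == 1 || pass_num == 3) = !(pvMergeable pass_num w) := by
  cases h1 : pvNumbers.contains w <;> cases h2 : pass_num == 1 <;> cases h3 : pass_num == 3 <;>
    simp [pvMergeable, h1, h2, h3]

theorem pvFoldA_eq (pass_num : Int) (ws : List (List Char)) :
    ∀ st acc, pvFlushA (ws.foldl (pvStepA pass_num) (st, acc)) = acc ++ pvT pass_num st ws := by
  induction ws with
  | nil => intro st acc; cases st <;> simp [pvFlushA, pvT]
  | cons w ws ih =>
    intro st acc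
    rw [List.foldl_cons]
    by_cases hm : pvMergeable pass_num w = true
    · have hc : (!(pvNumbers.contains w) || pass_num == 1 || pass_num == 3) = false := by
        rw [pvCond_eq, hm]; rfl
      cases st with
      | none =>
        have : pvStepA pass_num (none, acc) w = (some (pvNum w), acc) := by
          simp [pvStepA, hc, pvNum]
        rw [this, ih, pvT, if_pos hm]
      | some n =>
        have : pvStepA pass_num (some n, acc) w = (some (n ++ pvNum w), acc) := by
          simp [pvStepA, hc, pvNum]
        rw [this, ih, pvT, if_pos hm]
    · have hm' : pvMergeable pass_num w = false := by
        simpa using hm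
      have hc : (!(pvNumbers.contains w) || pass_num == 1 || pass_num == 3) = true := by
        rw [pvCond_eq, hm']; rfl
      have htok : ∀ rp : List Char,
          (match pvAbbrev.get? w with
           | some a => rp ++ a ++ [' ']
           | none => rp ++ w ++ [' ']) = rp ++ pvTok w ++ [' '] := by
        intro rp; cases h : pvAbbrev.get? w <;> simp [pvTok, PySem.Dict.getD, h]
      cases st with
      | none =>
        have : pvStepA pass_num (none, acc) w = (none, acc ++ pvTok w ++ [' ']) := by
          simp only [pvStepA, hc, if_true]
          exact congrArg (Prod.mk none) (htok acc)
        rw [this, ih, pvT, if_neg (by simp [hm'])]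
        simp [List.append_assoc]
      | some n =>
        have : pvStepA pass_num (some n, acc) w = (none, acc ++ n ++ [' '] ++ pvTok w ++ [' ']) := by
          simp only [pvStepA, hc, if_true]
          exact congrArg (Prod.mk none) (htok (acc ++ n ++ [' ']))
        rw [this, ih, pvT, if_neg (by simp [hm'])]
        simp [List.append_assoc]

theorem pvPush_push (a b : List Char) (l : List (Bool × List Char)) :
    pvPush a (pvPush b l) = pvPush (a ++ b) l := by
  cases l with
  | nil => simp [pvPush]
  | cons x r =>
    obtain ⟨k, t⟩ := x
    cases k <;> simp [pvPush, List.append_assoc]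

theorem pvNF_of_merge1_none : ∀ {l : List (Bool × List Char)},
    pvMerge1 l = none → pvNF l = l := by
  intro l
  induction l with
  | nil => intro _; rfl
  | cons x rest ih =>
    intro h
    match x, rest with
    | (true, a), (true, b) :: r => simp [pvMerge1] at h
    | (true, a), [] => simp [pvNF, pvPush]
    | (true, a), (false, t) :: r =>
      simp only [pvMerge1, Option.map_eq_none_iff] at h
      have h' : pvMerge1 ((false, t) :: r) = none := by simp [pvMerge1, h]
      show pvPush a (pvNF ((false, t) :: r)) = (true, a) :: (false, t) :: r
      rw [ih h']
      rfl
    | (false, t), rest =>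
      simp only [pvMerge1, Option.map_eq_none_iff] at h
      rw [pvNF, ih h]

theorem pvNF_of_merge1_some : ∀ {l l' : List (Bool × List Char)},
    pvMerge1 l = some l' → pvNF l' = pvNF l := by
  intro l
  induction l with
  | nil => intro l' h; simp [pvMerge1] at h
  | cons x rest ih =>
    intro l' h
    match x, rest with
    | (true, a), (true, b) :: r =>
      simp only [pvMerge1, Option.some.injEq] at h
      subst h
      show pvPush (a ++ b) (pvNF r) = pvPush a (pvNF ((true, b) :: r))
      rw [show pvNF ((true, b) :: r) = pvPush b (pvNF r) from rfl, pvPush_push]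
    | (true, a), [] => simp [pvMerge1] at h
    | (true, a), (false, t) :: r =>
      simp only [pvMerge1, Option.map_eq_some_iff] at h
      obtain ⟨r', ⟨a', ha', rfl⟩, rfl⟩ := h
      show pvPush a (pvNF ((false, t) :: a')) = pvPush a (pvNF ((false, t) :: r))
      rw [ih (l' := (false, t) :: a') (by simp [pvMerge1, ha'])]
    | (false, t), rest =>
      simp only [pvMerge1, Option.map_eq_some_iff] at h
      obtain ⟨r', hr', rfl⟩ := h
      show (false, t) :: pvNF r' = (false, t) :: pvNF rest
      rw [ih hr']

theorem pvMergeAll_eq_NF (l : List (Bool × List Char)) : pvMergeAll l = pvNF l := by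
  induction l using pvMergeAll.induct with
  | case1 l h =>
    rw [pvMergeAll]
    split
    · exact (pvNF_of_merge1_none h).symm
    · next l'' h' => rw [h] at h'; exact absurd h' (by simp)
  | case2 l l' h ih =>
    rw [pvMergeAll]
    split
    · next h' => rw [h] at h'; exact absurd h' (by simp)
    · next l'' h' =>
        rw [h] at h'
        cases h'
        rw [ih, pvNF_of_merge1_some h]

theorem pvNF_cells (pass_num : Int) (ws : List (List Char)) :
    (pvNF (pvCells pass_num ws)).map Prod.snd = pvTokS pass_num none ws ∧
    ∀ n, (pvPush n (pvNF (pvCells pass_num ws))).map Prod.snd = pvTokS pass_num (some n) ws := by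
  induction ws with
  | nil => exact ⟨rfl, fun n => by simp [pvCells, pvNF, pvPush, pvTokS]⟩
  | cons w ws ih =>
    obtain ⟨ih1, ih2⟩ := ih
    by_cases hm : pvMergeable pass_num w = true
    · have hc : pvCells pass_num (w :: ws) = (true, pvNum w) :: pvCells pass_num ws := by
        simp [pvCells, hm]
      have hnf : pvNF (pvCells pass_num (w :: ws)) = pvPush (pvNum w) (pvNF (pvCells pass_num ws)) := by
        rw [hc]; rfl
      refine ⟨?_, ?_⟩
      · rw [hnf, ih2 (pvNum w), pvTokS, if_pos hm]
      · intro n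
        rw [hnf, pvPush_push, ih2 (n ++ pvNum w), pvTokS, if_pos hm]
    · have hm' : pvMergeable pass_num w = false := by simpa using hm
      have hc : pvCells pass_num (w :: ws) = (false, pvTok w) :: pvCells pass_num ws := by
        simp [pvCells, hm']
      have hnf : pvNF (pvCells pass_num (w :: ws)) = (false, pvTok w) :: pvNF (pvCells pass_num ws) := by
        rw [hc]; rfl
      refine ⟨?_, ?_⟩
      · rw [hnf, List.map_cons, ih1, pvTokS, if_neg (by simp [hm'])]
      · intro n
        have hp : pvPush n ((false, pvTok w) :: pvNF (pvCells pass_num ws))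
            = (true, n) :: (false, pvTok w) :: pvNF (pvCells pass_num ws) := rfl
        rw [hnf, hp]
        show n :: pvTok w :: List.map Prod.snd (pvNF (pvCells pass_num ws))
            = pvTokS pass_num (some n) (w :: ws)
        rw [ih1, show pvTokS pass_num (some n) (w :: ws)
            = n :: pvTok w :: pvTokS pass_num none ws from by simp [pvTokS, hm']]

theorem pvTokens_eq (pass_num : Int) (ws : List (List Char)) :
    (pvMergeAll (pvCells pass_num ws)).map Prod.snd = pvTokS pass_num none ws := by
  rw [pvMergeAll_eq_NF]
  exact (pvNF_cells pass_num ws).1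

theorem pvT_cases (pass_num : Int) (ws : List (List Char)) :
    ∀ st, pvT pass_num st ws = pvS (pvTokS pass_num st ws) ∨
          pvT pass_num st ws = PySem.Chars.join [' '] (pvTokS pass_num st ws) := by
  induction ws with
  | nil =>
    intro st
    cases st with
    | none => left; simp [pvT, pvTokS, pvS]
    | some n => right; simp [pvT, pvTokS, PySem.Chars.join_singleton]
  | cons w ws ih =>
    intro st
    by_cases hm : pvMergeable pass_num w = true
    · cases st with
      | none => simpa [pvT, pvTokS, hm] using ih (some (pvNum w))
      | some n => simpa [pvT, pvTokS, hm] using ih (some (n ++ pvNum w))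
    · have hm' : pvMergeable pass_num w = false := by simpa using hm
      cases st with
      | none =>
        rw [show pvT pass_num none (w :: ws) = pvTok w ++ [' '] ++ pvT pass_num none ws from by
          simp [pvT, hm']]
        rw [show pvTokS pass_num none (w :: ws) = pvTok w :: pvTokS pass_num none ws from by
          simp [pvTokS, hm']]
        rcases ih none with h | h
        · left; rw [h]; simp [pvS, List.append_assoc]
        · cases hts : pvTokS pass_num none ws with
          | nil =>
            left
            rw [hts] at h
            rw [h]
            simp [pvS, PySem.Chars.join_nil]
          | cons a l =>
            right
            rw [h, hts, PySem.Chars.join_cons_cons]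
      | some n =>
        rw [show pvT pass_num (some n) (w :: ws)
            = n ++ [' '] ++ pvTok w ++ [' '] ++ pvT pass_num none ws from by simp [pvT, hm']]
        rw [show pvTokS pass_num (some n) (w :: ws)
            = n :: pvTok w :: pvTokS pass_num none ws from by simp [pvTokS, hm']]
        rcases ih none with h | h
        · left; rw [h]; simp [pvS, List.append_assoc]
        · cases hts : pvTokS pass_num none ws with
          | nil =>
            left
            rw [hts] at h
            rw [h]
            simp [pvS, PySem.Chars.join_nil, List.append_assoc]
          | cons a l =>
            right
            rw [h, hts, PySem.Chars.join_cons_cons, PySem.Chars.join_cons_cons]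
            simp [List.append_assoc]

theorem pvS_eq_join_space (ts : List (List Char)) (h : ts ≠ []) :
    pvS ts = PySem.Chars.join [' '] ts ++ [' '] := by
  induction ts with
  | nil => exact absurd rfl h
  | cons t ts ih =>
    cases ts with
    | nil => simp [pvS, PySem.Chars.join_singleton]
    | cons u r =>
      rw [PySem.Chars.join_cons_cons]
      have : pvS (t :: u :: r) = t ++ [' '] ++ pvS (u :: r) := by
        simp [pvS]
      rw [this, ih (by simp)]
      simp [List.append_assoc]

theorem pvStrip_append_space (x : List Char) :
    PySem.Chars.strip (x ++ [' ']) = PySem.Chars.strip x := by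
  have hsp : PySem.Chars.isspace ' ' = true := by decide
  simp only [PySem.Chars.strip, PySem.Chars.lstrip, PySem.Chars.rstrip]
  rw [List.dropWhile_append]
  split_ifs with h
  · rw [List.isEmpty_iff] at h
    rw [h]
    simp [hsp]
  · rw [List.reverse_append]
    simp [hsp]

theorem pvStrip_S_join (ts : List (List Char)) :
    PySem.Chars.strip (pvS ts) = PySem.Chars.strip (PySem.Chars.join [' '] ts) := by
  cases h : ts with
  | nil => simp [pvS, PySem.Chars.join_nil]
  | cons a l => rw [← h, pvS_eq_join_space ts (by rw [h]; simp), pvStrip_append_space]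

theorem pvStrip_eq_self (cs : List Char) (h : cs ≠ [])
    (hh : ∀ c, cs.head? = some c → PySem.Chars.isspace c = false)
    (hl : ∀ c, cs.getLast? = some c → PySem.Chars.isspace c = false) :
    PySem.Chars.strip cs = cs := by
  simp only [PySem.Chars.strip, PySem.Chars.lstrip, PySem.Chars.rstrip]
  have h1 : List.dropWhile PySem.Chars.isspace cs = cs := by
    cases cs with
    | nil => rfl
    | cons c r => rw [List.dropWhile_cons_of_neg]; simp [hh c rfl]
  rw [h1]
  cases hr : cs.reverse with
  | nil => simp at hr; exact absurd hr h
  | cons c r =>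
    have hc : cs.getLast? = some c := by rw [← List.head?_reverse, hr]; rfl
    have hd : List.dropWhile PySem.Chars.isspace (c :: r) = c :: r :=
      List.dropWhile_cons_of_neg (by simp [hl c hc])
    calc (List.dropWhile PySem.Chars.isspace (c :: r)).reverse
        = (c :: r).reverse := by rw [hd]
      _ = cs.reverse.reverse := by rw [← hr]
      _ = cs := List.reverse_reverse cs

theorem pvGood_iff (t : List Char) :
    pvGood t = true ↔ t ≠ [] ∧ ∀ c ∈ t, PySem.Chars.isspace c = false := by
  simp [pvGood, List.all_eq_true]

theorem pvJoin_good_ends (ts : List (List Char)) (h : ts ≠ []) (hg : ∀ t ∈ ts, pvGood t = true) :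
    PySem.Chars.join [' '] ts ≠ [] ∧
    (∀ c, (PySem.Chars.join [' '] ts).head? = some c → PySem.Chars.isspace c = false) ∧
    (∀ c, (PySem.Chars.join [' '] ts).getLast? = some c → PySem.Chars.isspace c = false) := by
  induction ts with
  | nil => exact absurd rfl h
  | cons t ts ih =>
    obtain ⟨htne, htns⟩ := (pvGood_iff t).mp (hg t (by simp))
    have hhd : ∀ c, t.head? = some c → c ∈ t := by
      intro c hc
      cases t with
      | nil => simp at hc
      | cons a r => simp at hc; simp [hc]
    cases ts with
    | nil =>
      rw [PySem.Chars.join_singleton]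
      exact ⟨htne,
        fun c hc => htns c (hhd c hc),
        fun c hc => htns c (List.mem_of_getLast? hc)⟩
    | cons u r =>
      have ihr := ih (by simp) (fun x hx => hg x (by simp [hx]))
      rw [PySem.Chars.join_cons_cons]
      refine ⟨by simp [htne], ?_, ?_⟩
      · intro c hc
        cases t with
        | nil => exact absurd rfl htne
        | cons a w =>
          simp only [List.cons_append, List.head?_cons, Option.some.injEq] at hc
          exact htns c (by simp [← hc])
      · intro c hc
        rw [List.append_assoc, List.getLast?_append] at hc
        have hj : (PySem.Chars.join [' '] (u :: r)).getLast?.isSome := by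
          cases hjj : (PySem.Chars.join [' '] (u :: r)) with
          | nil => exact absurd hjj ihr.1
          | cons a w => simp [List.getLast?_isSome]
        rw [List.getLast?_append] at hc
        cases hjl : (PySem.Chars.join [' '] (u :: r)).getLast? with
        | none => rw [hjl] at hj; simp at hj
        | some d =>
          rw [hjl] at hc
          simp at hc
          exact hc ▸ ihr.2.2 d hjl

theorem pvStrip_join_good (ts : List (List Char)) (hg : ∀ t ∈ ts, pvGood t = true) :
    PySem.Chars.strip (PySem.Chars.join [' '] ts) = PySem.Chars.join [' '] ts := by
  cases h : ts with
  | nil => simp [PySem.Chars.join_nil]; rfl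
  | cons a l =>
    rw [← h]
    obtain ⟨h1, h2, h3⟩ := pvJoin_good_ends ts (by rw [h]; simp) hg
    exact pvStrip_eq_self _ h1 h2 h3

theorem pvGo_nonspace (t : List Char) (ht : ∀ c ∈ t, PySem.Chars.isspace c = false) :
    ∀ x cur acc, PySem.Chars.split₀.go (t ++ x) cur acc = PySem.Chars.split₀.go x (t.reverse ++ cur) acc := by
  induction t with
  | nil => intro x cur acc; simp
  | cons c t ih =>
    intro x cur acc
    have hc : PySem.Chars.isspace c = false := ht c (by simp)
    rw [List.cons_append]
    rw [show PySem.Chars.split₀.go (c :: (t ++ x)) cur acc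
        = PySem.Chars.split₀.go (t ++ x) (c :: cur) acc from by
      simp [PySem.Chars.split₀.go, hc]]
    rw [ih (fun d hd => ht d (by simp [hd])) x (c :: cur) acc]
    simp [List.append_assoc]

theorem pvGo_trailing_space (x : List Char) :
    ∀ cur acc, PySem.Chars.split₀.go (x ++ [' ']) cur acc = PySem.Chars.split₀.go x cur acc := by
  have hsp : PySem.Chars.isspace ' ' = true := by decide
  induction x with
  | nil =>
    intro cur acc
    rw [List.nil_append]
    by_cases hcur : cur.isEmpty <;>
      simp [PySem.Chars.split₀.go, hsp, hcur]
  | cons c x ih =>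
    intro cur acc
    rw [List.cons_append]
    by_cases hc : PySem.Chars.isspace c = true <;>
      simp [PySem.Chars.split₀.go, hc, ih]

theorem pvGo_join (ts : List (List Char)) (hg : ∀ t ∈ ts, pvGood t = true) :
    ∀ acc, PySem.Chars.split₀.go (PySem.Chars.join [' '] ts) [] acc = acc.reverse ++ ts := by
  have hsp : PySem.Chars.isspace ' ' = true := by decide
  induction ts with
  | nil => intro acc; simp [PySem.Chars.join_nil, PySem.Chars.split₀.go]
  | cons t ts ih =>
    intro acc
    obtain ⟨htne, htns⟩ := (pvGood_iff t).mp (hg t (by simp))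
    cases ts with
    | nil =>
      rw [PySem.Chars.join_singleton]
      have h2 : PySem.Chars.split₀.go t [] acc = PySem.Chars.split₀.go [] t.reverse acc := by
        simpa using pvGo_nonspace t htns [] [] acc
      rw [h2]
      simp [PySem.Chars.split₀.go, List.isEmpty_iff, htne]
    | cons u r =>
      rw [PySem.Chars.join_cons_cons, List.append_assoc]
      rw [pvGo_nonspace t htns ([' '] ++ PySem.Chars.join [' '] (u :: r)) [] acc]
      rw [List.append_nil, List.singleton_append]
      rw [show PySem.Chars.split₀.go (' ' :: PySem.Chars.join [' '] (u :: r)) t.reverse acc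
          = PySem.Chars.split₀.go (PySem.Chars.join [' '] (u :: r)) [] (t :: acc) from by
        simp [PySem.Chars.split₀.go, hsp, List.isEmpty_iff, htne]]
      rw [ih (fun x hx => hg x (by simp [hx])) (t :: acc)]
      simp

theorem pvSplit₀_join_good (ts : List (List Char)) (hg : ∀ t ∈ ts, pvGood t = true) :
    PySem.Chars.split₀ (PySem.Chars.join [' '] ts) = ts := by
  simp only [PySem.Chars.split₀]
  rw [pvGo_join ts hg []]
  simp

theorem pvSplit₀_S_good (ts : List (List Char)) (hg : ∀ t ∈ ts, pvGood t = true) :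
    PySem.Chars.split₀ (pvS ts) = ts := by
  cases hts : ts with
  | nil => simp [pvS, PySem.Chars.split₀, PySem.Chars.split₀.go]
  | cons a l =>
    rw [← hts, pvS_eq_join_space ts (by rw [hts]; simp)]
    simp only [PySem.Chars.split₀]
    rw [pvGo_trailing_space, pvGo_join ts hg []]
    simp

theorem pvGo_good (s : List Char) :
    ∀ cur acc, (∀ c ∈ cur, PySem.Chars.isspace c = false) → (∀ t ∈ acc, pvGood t = true) →
      ∀ t ∈ PySem.Chars.split₀.go s cur acc, pvGood t = true := by
  induction s with
  | nil =>
    intro cur acc hcur hacc t ht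
    simp only [PySem.Chars.split₀.go] at ht
    by_cases hc : cur.isEmpty
    · rw [if_pos hc] at ht
      exact hacc t (by simpa using ht)
    · rw [if_neg hc] at ht
      simp only [List.reverse_cons, List.mem_append, List.mem_reverse, List.mem_cons] at ht
      rcases ht with ht | ht
      · exact hacc t ht
      · rcases ht with rfl | hfalse
        · refine (pvGood_iff _).mpr ⟨?_, fun d hd => hcur d (by simpa using hd)⟩
          simp only [List.isEmpty_iff] at hc
          simp [hc]
        · simp at hfalse
  | cons c s ih =>
    intro cur acc hcur hacc t ht
    simp only [PySem.Chars.split₀.go] at ht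
    by_cases hc : PySem.Chars.isspace c = true
    · rw [if_pos hc] at ht
      by_cases hce : cur.isEmpty
      · rw [if_pos hce] at ht
        exact ih [] acc (by simp) hacc t ht
      · rw [if_neg hce] at ht
        refine ih [] (cur.reverse :: acc) (by simp) ?_ t ht
        intro u hu
        rcases List.mem_cons.mp hu with rfl | hu
        · refine (pvGood_iff _).mpr ⟨?_, fun d hd => hcur d (by simpa using hd)⟩
          simp only [List.isEmpty_iff] at hce
          simp [hce]
        · exact hacc u hu
    · rw [if_neg hc] at ht
      refine ih (c :: cur) acc ?_ hacc t ht
      intro d hd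
      rcases List.mem_cons.mp hd with rfl | hd
      · simpa using hc
      · exact hcur d hd

theorem pvSplit₀_good (s : List Char) : ∀ t ∈ PySem.Chars.split₀ s, pvGood t = true := by
  intro t ht
  exact pvGo_good s [] [] (by simp) (by simp) t (by simpa [PySem.Chars.split₀] using ht)

theorem pvNum_good (w : List Char) (h : pvNumbers.contains w = true) : pvGood (pvNum w) = true := by
  have hvals : ∀ p ∈ pvNumbers.items, pvGood p.2 = true := by decide
  simp only [PySem.Dict.contains, List.any_eq_true] at h
  obtain ⟨p, hp, hpw⟩ := h
  cases hf : List.find? (fun q => q.1 == w) pvNumbers.items with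
  | none => exact absurd hpw (by simpa using List.find?_eq_none.mp hf p hp)
  | some q =>
    have hq := List.mem_of_find?_eq_some hf
    have heq : pvNum w = q.2 := by simp [pvNum, PySem.Dict.getD, PySem.Dict.get?, hf]
    rw [heq]
    exact hvals q hq

theorem pvTok_good (w : List Char) (h : pvGood w = true) : pvGood (pvTok w) = true := by
  have hvals : ∀ p ∈ pvAbbrev.items, pvGood p.2 = true := by decide
  cases hf : List.find? (fun q => q.1 == w) pvAbbrev.items with
  | none => simpa [pvTok, PySem.Dict.getD, PySem.Dict.get?, hf] using h
  | some q =>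
    have hq := List.mem_of_find?_eq_some hf
    simpa [pvTok, PySem.Dict.getD, PySem.Dict.get?, hf] using hvals q hq

theorem pvGood_append (a b : List Char) (ha : pvGood a = true) (hb : pvGood b = true) :
    pvGood (a ++ b) = true := by
  obtain ⟨h1, h2⟩ := (pvGood_iff a).mp ha
  obtain ⟨_, h4⟩ := (pvGood_iff b).mp hb
  refine (pvGood_iff _).mpr ⟨by simp [h1], ?_⟩
  intro c hc
  rcases List.mem_append.mp hc with h | h
  exacts [h2 c h, h4 c h]

theorem pvTokS_good (pass_num : Int) (ws : List (List Char)) :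
    ∀ st, (∀ w ∈ ws, pvGood w = true) → (∀ n, st = some n → pvGood n = true) →
    ∀ t ∈ pvTokS pass_num st ws, pvGood t = true := by
  induction ws with
  | nil =>
    intro st hws hst t ht
    cases st with
    | none => simp [pvTokS] at ht
    | some n =>
      simp only [pvTokS, List.mem_singleton] at ht
      exact ht ▸ hst n rfl
  | cons w ws ih =>
    intro st hws hst t ht
    have hw : pvGood w = true := hws w (by simp)
    by_cases hm : pvMergeable pass_num w = true
    · have hcont : pvNumbers.contains w = true := by
        cases hcc : pvNumbers.contains w
        · rw [pvMergeable, hcc] at hm; simp at hm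
        · rfl
      cases st with
      | none =>
        rw [show pvTokS pass_num none (w :: ws) = pvTokS pass_num (some (pvNum w)) ws from by
          simp [pvTokS, hm]] at ht
        exact ih (some (pvNum w)) (fun u hu => hws u (by simp [hu]))
          (fun n hn => by cases hn; exact pvNum_good w hcont) t ht
      | some n =>
        rw [show pvTokS pass_num (some n) (w :: ws) = pvTokS pass_num (some (n ++ pvNum w)) ws from by
          simp [pvTokS, hm]] at ht
        exact ih (some (n ++ pvNum w)) (fun u hu => hws u (by simp [hu]))
          (fun m hn => by cases hn; exact pvGood_append n (pvNum w) (hst n rfl) (pvNum_good w hcont)) t ht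
    · have hm' : pvMergeable pass_num w = false := by simpa using hm
      cases st with
      | none =>
        rw [show pvTokS pass_num none (w :: ws) = pvTok w :: pvTokS pass_num none ws from by
          simp [pvTokS, hm']] at ht
        rcases List.mem_cons.mp ht with rfl | ht
        · exact pvTok_good w hw
        · exact ih none (fun u hu => hws u (by simp [hu])) (by simp) t ht
      | some n =>
        rw [show pvTokS pass_num (some n) (w :: ws) = n :: pvTok w :: pvTokS pass_num none ws from by
          simp [pvTokS, hm']] at ht
        rcases List.mem_cons.mp ht with rfl | ht
        · exact hst t rfl
        · rcases List.mem_cons.mp ht with rfl | ht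
          · exact pvTok_good w hw
          · exact ih none (fun u hu => hws u (by simp [hu])) (by simp) t ht

theorem pvPass2A_eq (acc w : List Char) : pvPass2A acc w = acc ++ pvS (pvPass2B w) := by
  simp only [pvPass2A, pvPass2B]
  split_ifs with h <;> simp [pvS, List.append_assoc]

theorem pvS_flatMap (ts : List (List Char)) (g : List Char → List (List Char)) :
    pvS (ts.flatMap g) = (ts.map (fun w => pvS (g w))).flatten := by
  induction ts with
  | nil => simp [pvS]
  | cons t ts ih =>
    simp only [List.flatMap_cons, List.map_cons, List.flatten_cons]
    rw [← ih]
    simp [pvS, List.map_append, List.flatten_append]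

-- ===== VERDICT (by name: the statement is the Claim_ definition above) =====
theorem process_phrase_spec : Claim_equal_process_phrase := by
  intro phrase pass_num _hdom
  unfold Spec_process_phrase
  simp only [process_phrase, process_phrase_alt]
  generalize hws : PySem.Chars.split₀ (PySem.Chars.strip phrase.toList) = ws
  have hgoodw : ∀ w ∈ ws, pvGood w = true := hws ▸ pvSplit₀_good _
  have hgood : ∀ t ∈ pvTokS pass_num none ws, pvGood t = true :=
    pvTokS_good pass_num ws none hgoodw (fun n hn => by cases hn)
  have hA : pvFlushA (List.foldl (pvStepA pass_num) (none, []) ws) = pvT pass_num none ws := by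
    simpa using pvFoldA_eq pass_num ws none []
  have hT := pvT_cases pass_num ws none
  have hsplit : PySem.Chars.split₀ (pvT pass_num none ws) = pvTokS pass_num none ws := by
    rcases hT with h | h <;> rw [h]
    · exact pvSplit₀_S_good _ hgood
    · exact pvSplit₀_join_good _ hgood
  have hstr : PySem.Chars.strip (pvT pass_num none ws)
      = PySem.Chars.join [' '] (pvTokS pass_num none ws) := by
    rcases hT with h | h <;> rw [h]
    · rw [pvStrip_S_join]; exact pvStrip_join_good _ hgood
    · exact pvStrip_join_good _ hgood
  rw [hA, pvTokens_eq pass_num ws]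
  by_cases h2 : pass_num == 2
  · simp only [h2, if_true]
    rw [hsplit]
    have hfold : List.foldl pvPass2A [] (pvTokS pass_num none ws)
        = pvS ((pvTokS pass_num none ws).flatMap pvPass2B) := by
      rw [PySem.List.foldl_congr_mem (pvTokS pass_num none ws) pvPass2A
        (fun acc w => acc ++ pvS (pvPass2B w)) [] (fun acc x _ => pvPass2A_eq acc x)]
      rw [PySem.List.foldl_append_eq_flatMap]
      rw [pvS_flatMap]
      simp [List.flatMap_def]
    rw [hfold, pvStrip_S_join]
  · by_cases h3 : pass_num == 3
    · simp only [h2, h3, if_true, Bool.false_eq_true, if_false]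
      rw [hstr]
    · simp only [h2, h3, Bool.false_eq_true, if_false]
      rw [hstr, pvStrip_join_good _ hgood]
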